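-- pv_equiv track=rewrite | github.com/Kirito123l/Emission_Agenet_Ali | evaluation/eval_end2end.py | _geometry_gate_prefix
-- ===== SOURCE A (Python) =====
-- from typing import Any, Awaitable, Callable, Dict, List, Optional, TypeVar
--
-- GEOMETRY_REQUIRED_TOOLS = {
--     "calculate_dispersion",
--     "render_spatial_map",
-- }
--
-- def _geometry_gate_prefix(expected_tool_chain: List[str]) -> Optional[List[str]]:
--     if not expected_tool_chain:
--         return None
--
--     prefix: List[str] = []
--     for tool_name in expected_tool_chain:
--         if tool_name in GEOMETRY_REQUIRED_TOOLS:
--             return prefix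
--         prefix.append(tool_name)
--     return None
-- ===== SOURCE B (Python) =====
-- GEOMETRY_REQUIRED_TOOLS = {
--     "calculate_dispersion",
--     "render_spatial_map",
-- }
--
-- def _geometry_gate_prefix(expected_tool_chain):
--     if not expected_tool_chain:
--         return None
--     idx = next((i for i, t in enumerate(expected_tool_chain)
--                 if t in GEOMETRY_REQUIRED_TOOLS), None)
--     if idx is None:
--         return None
--     return expected_tool_chain[:idx]
-- ===== Notes on version B (the rewrite author's own statement) =====
-- stated objective: alternative
-- what changed: B locates the first geometry tool's index with enumerate/next and slices the chain there, instead of A's incremental prefix accumulation with an early return inside the loop.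
import Mathlib
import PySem

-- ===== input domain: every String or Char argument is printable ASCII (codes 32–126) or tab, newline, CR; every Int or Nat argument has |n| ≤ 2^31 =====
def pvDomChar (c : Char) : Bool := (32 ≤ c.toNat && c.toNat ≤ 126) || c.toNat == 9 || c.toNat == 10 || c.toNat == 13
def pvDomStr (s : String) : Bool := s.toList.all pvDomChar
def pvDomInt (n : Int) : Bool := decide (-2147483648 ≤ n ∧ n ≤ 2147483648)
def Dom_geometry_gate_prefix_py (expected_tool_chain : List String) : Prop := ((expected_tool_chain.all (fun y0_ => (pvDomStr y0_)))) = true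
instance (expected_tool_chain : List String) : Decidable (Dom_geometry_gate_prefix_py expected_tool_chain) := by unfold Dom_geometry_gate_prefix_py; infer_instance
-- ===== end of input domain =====

-- B finds the first geometry tool's index with enumerate and slices there, instead of A's
-- incremental prefix accumulation with an early return (objective: alternative decomposition).

-- ===== PORT A =====
-- membership test 'tool_name in GEOMETRY_REQUIRED_TOOLS'
def pvIsGeom (t : String) : Bool := t == "calculate_dispersion" || t == "render_spatial_map"

-- A's loop: builds the prefix incrementally, early-returns it at the first geometry tool
def pvGeomLoopA : List String → List String → Option (List String)
  | [], _ => none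
  | t :: rest, pre => if pvIsGeom t then some pre else pvGeomLoopA rest (pre ++ [t])

def geometry_gate_prefix_py (expected_tool_chain : List String) : Option (List String) :=
  if expected_tool_chain = [] then none
  else pvGeomLoopA expected_tool_chain []

-- ===== PORT B =====
def geometry_gate_prefix_py_alt (expected_tool_chain : List String) : Option (List String) :=
  if expected_tool_chain = [] then none
  else
    match (PySem.List.enumerate expected_tool_chain 0).find? (fun p => pvIsGeom p.2) with
    | none => none
    | some (i, _) => some (PySem.List.slice expected_tool_chain none (some i))

-- ===== PRECONDITION & SPEC =====
def Spec_geometry_gate_prefix_py (expected_tool_chain : List String) (out : Option (List String)) : Prop := out = geometry_gate_prefix_py_alt expected_tool_chain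
instance (expected_tool_chain : List String) (out : Option (List String)) : Decidable (Spec_geometry_gate_prefix_py expected_tool_chain out) := by unfold Spec_geometry_gate_prefix_py; infer_instance

-- ===== CLAIM (what is proved, stated in full; the proofs are below) =====
def Claim_equal_geometry_gate_prefix_py : Prop := ∀ (expected_tool_chain : List String), Dom_geometry_gate_prefix_py expected_tool_chain → Spec_geometry_gate_prefix_py expected_tool_chain (geometry_gate_prefix_py expected_tool_chain)

-- ===== LEMMAS AND PROOFS =====

-- A's loop equals "find the first geometry index in the enumeration, take up to it".
lemma pvGeomLoopA_eq_find (xs : List String) (acc : List String) (s : Int) :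
    pvGeomLoopA xs acc =
      match (PySem.List.enumerate xs s).find? (fun p => pvIsGeom p.2) with
      | none => none
      | some (i, _) => some (acc ++ xs.take (i - s).toNat) := by
  induction xs generalizing acc s with
  | nil => simp [pvGeomLoopA, PySem.List.enumerate_nil]
  | cons x rest ih =>
    rw [PySem.List.enumerate_cons]
    by_cases hx : pvIsGeom x
    · simp [pvGeomLoopA, hx, List.find?]
    · simp only [pvGeomLoopA, hx, Bool.false_eq_true, if_false]
      rw [List.find?_cons_of_neg (by simpa using hx), ih (acc ++ [x]) (s + 1)]
      cases hfind : (PySem.List.enumerate rest (s + 1)).find? (fun p => pvIsGeom p.2) with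
      | none => simp
      | some p =>
        obtain ⟨i, v⟩ := p
        have hmem : (i, v) ∈ PySem.List.enumerate rest (s + 1) := List.mem_of_find?_eq_some hfind
        rw [PySem.List.mem_enumerate_iff] at hmem
        obtain ⟨k, hk, hp⟩ := hmem
        have hi : i = s + 1 + k := by simpa using congrArg Prod.fst hp
        have h1 : (i - (s + 1)).toNat = k := by omega
        have h2 : (i - s).toNat = k + 1 := by omega
        simp [h1, h2, List.take_succ_cons]

-- (found index from an enumeration starting at 0 is nonnegative)
lemma pv_find_nonneg (xs : List String) (i : Int) (v : String)
    (h : (PySem.List.enumerate xs 0).find? (fun p => pvIsGeom p.2) = some (i, v)) : 0 ≤ i := by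
  have hmem := List.mem_of_find?_eq_some h
  rw [PySem.List.mem_enumerate_iff] at hmem
  obtain ⟨k, hk, hp⟩ := hmem
  have : i = 0 + k := by simpa using congrArg Prod.fst hp
  omega

-- ===== VERDICT (by name: the statement is the Claim_ definition above) =====
theorem geometry_gate_prefix_py_spec : Claim_equal_geometry_gate_prefix_py := by
  intro xs _
  unfold Spec_geometry_gate_prefix_py geometry_gate_prefix_py geometry_gate_prefix_py_alt
  by_cases hnil : xs = []
  · simp [hnil]
  · simp only [if_neg hnil]
    rw [pvGeomLoopA_eq_find xs [] 0]
    cases hfind : (PySem.List.enumerate xs 0).find? (fun p => pvIsGeom p.2) with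
    | none => simp
    | some p =>
      obtain ⟨i, v⟩ := p
      have hi : 0 ≤ i := pv_find_nonneg xs i v hfind
      simp [PySem.List.slice_to _ hi]
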